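-- pv_equiv track=rewrite | github.com/bingli8802/codility | BinaryGap.py | solution
-- ===== SOURCE A (Python) =====
-- def solution(N):
--     # write your code in Python 3.6
--     br = str(bin(N))[2:]
--     res = 0
--     cur = 0
--     for i in range(1, len(br)-1):
--         if br[i] == "0":
--             if br[i-1] == "1" or cur != 0:
--                 cur += 1
--             if br[i+1] == "1":
--                 res = max(res, cur)
--                 cur = 0
--     return res
-- ===== SOURCE B (Python) =====
-- def solution(N):
--     br = bin(N)[2:]
--     ones = [i for i, c in enumerate(br) if c == "1"]
--     return max((j - i - 1 for i, j in zip(ones, ones[1:])), default=0)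
-- ===== Notes on version B (the rewrite author's own statement) =====
-- stated objective: idiomatic
-- what changed: Replaces the stateful zero-run accumulator with lookback/lookahead indexing by a list of set-bit positions and the maximum of consecutive-position gaps.
import Mathlib
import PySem

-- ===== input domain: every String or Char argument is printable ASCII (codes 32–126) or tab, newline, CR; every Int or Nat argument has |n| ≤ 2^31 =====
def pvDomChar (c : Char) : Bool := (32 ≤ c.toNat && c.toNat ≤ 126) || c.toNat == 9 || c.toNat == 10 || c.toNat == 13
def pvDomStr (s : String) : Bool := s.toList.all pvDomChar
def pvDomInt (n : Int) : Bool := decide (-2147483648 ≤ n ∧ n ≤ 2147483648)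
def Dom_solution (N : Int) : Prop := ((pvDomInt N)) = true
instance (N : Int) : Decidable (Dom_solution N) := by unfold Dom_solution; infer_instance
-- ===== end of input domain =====

-- B replaces A's stateful zero-run accumulator by the list of set-bit positions and the
-- maximum gap between consecutive ones (idiomatic alternative; same return value everywhere).

-- ===== PORT A =====
-- the loop body of A's for-loop (st = (res, cur), i the loop index)
def stepA (br : List Char) (st : Int × Int) (i : Int) : Int × Int :=
  if (PySem.List.pyGet? br i).getD ' ' = '0' then
    let cur := if (PySem.List.pyGet? br (i - 1)).getD ' ' = '1' ∨ st.2 ≠ 0 then st.2 + 1 else st.2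
    if (PySem.List.pyGet? br (i + 1)).getD ' ' = '1' then (max st.1 cur, 0) else (st.1, cur)
  else st

-- str(bin(N))[2:] is ported as (toBinChars0b N).drop 2 (exact: the slice start 2 is nonnegative)
def solution (N : Int) : Int :=
  let br := (PySem.Int.toBinChars0b N).drop 2
  ((PySem.List.pyRange 1 (PySem.List.len br - 1) 1).foldl (stepA br) (0, 0)).1

-- ===== PORT B =====
-- ones[1:] is ported as ones.drop 1 (exact: slice start 1 is nonnegative); max(gen, default=0)
-- is ported as (max? gaps id).getD 0 (first extremum; plain max over Int)
def solution_alt (N : Int) : Int :=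
  let br := (PySem.Int.toBinChars0b N).drop 2
  let ones : List Int := (PySem.List.enumerate br).filterMap (fun p => if p.2 = '1' then some p.1 else none)
  ((PySem.List.max? ((ones.zip (ones.drop 1)).map (fun p => p.2 - p.1 - 1)) (fun x => x)).getD 0)

-- ===== PRECONDITION & SPEC =====
def Spec_solution (N : Int) (out : Int) : Prop := out = solution_alt N
instance (N : Int) (out : Int) : Decidable (Spec_solution N out) := by unfold Spec_solution; infer_instance

-- ===== CLAIM (what is proved, stated in full; the proofs are below) =====
def Claim_equal_solution : Prop := ∀ (N : Int), Dom_solution N → Spec_solution N (solution N)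

-- ===== LEMMAS AND PROOFS =====

-- A's loop body as a function of the three-character window (prev, cur, next)
def step3 (a b c : Char) (st : Int × Int) : Int × Int :=
  if b = '0' then
    let cur := if a = '1' ∨ st.2 ≠ 0 then st.2 + 1 else st.2
    if c = '1' then (max st.1 cur, 0) else (st.1, cur)
  else st

-- fold of step3 over all windows of width 3
def wfold : List Char → Int × Int → Int × Int
  | a :: b :: c :: t, st => wfold (b :: c :: t) (step3 a b c st)
  | _, st => st

-- reference scan: in-phase (a '1' has been seen; cur = zeros since the last '1')
def scanIn : List Char → Int → Int → Int
  | [], _, res => res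
  | c :: t, cur, res => if c = '1' then scanIn t 0 (max res cur) else scanIn t (cur + 1) res

-- reference scan: pre-phase (no '1' seen yet)
def scanPre2 : List Char → Int → Int
  | [], res => res
  | c :: t, res => if c = '1' then scanIn t 0 res else scanPre2 t res

def onesF (l : List Char) (s : Int) : List Int :=
  (PySem.List.enumerate l s).filterMap (fun p => if p.2 = '1' then some p.1 else none)

def gaps (xs : List Int) : List Int := (xs.zip (xs.drop 1)).map (fun p => p.2 - p.1 - 1)

lemma onesF_cons (c : Char) (t : List Char) (s : Int) :
    onesF (c :: t) s = if c = '1' then s :: onesF t (s + 1) else onesF t (s + 1) := by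
  simp only [onesF, PySem.List.enumerate_cons, List.filterMap_cons]
  split_ifs <;> simp_all

lemma wfold3 (a b c : Char) (t : List Char) (st : Int × Int) :
    wfold (a :: b :: c :: t) st = wfold (b :: c :: t) (step3 a b c st) := by
  simp [wfold]

-- index-fold over pyRange = window fold
lemma G' : ∀ (suf l : List Char) (j : Nat) (st : Int × Int), l.drop j = suf →
    (PySem.List.pyRange ((j : Int) + 1) ((l.length : Int) - 1) 1).foldl (stepA l) st = wfold suf st := by
  intro suf
  induction suf with
  | nil =>
    intro l j st h
    have hlen : l.length ≤ j := List.drop_eq_nil_iff.mp h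
    rw [PySem.List.pyRange_one_eq_nil (by push_cast; omega)]
    rfl
  | cons a suf' ih =>
    intro l j st h
    have hj : j < l.length := by
      by_contra hc
      rw [List.drop_eq_nil_iff.mpr (by omega)] at h
      exact List.cons_ne_nil _ _ h.symm
    have hdlen : (l.drop j).length = l.length - j := List.length_drop ..
    have hdrop1 : l.drop (j + 1) = suf' := by
      have : l.drop (j + 1) = (l.drop j).drop 1 := by rw [List.drop_drop]
      rw [this, h, List.drop_one, List.tail_cons]
    cases suf' with
    | nil =>
      have hn : l.length = j + 1 := by rw [h] at hdlen; simp at hdlen; omega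
      rw [PySem.List.pyRange_one_eq_nil (by push_cast; omega)]
      rfl
    | cons b suf'' =>
      cases suf'' with
      | nil =>
        have hn : l.length = j + 2 := by rw [h] at hdlen; simp at hdlen; omega
        rw [PySem.List.pyRange_one_eq_nil (by push_cast; omega)]
        rfl
      | cons c t =>
        have hn : l.length = j + 3 + t.length := by rw [h] at hdlen; simp at hdlen; omega
        have ha : l[j]? = some a := by
          have h0 : (l.drop j)[(0 : Nat)]? = some a := by rw [h]; rfl
          rw [List.getElem?_drop] at h0; simpa using h0
        have hb : l[j + 1]? = some b := by
          have h0 : (l.drop j)[(1 : Nat)]? = some b := by rw [h]; rfl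
          rw [List.getElem?_drop] at h0; simpa using h0
        have hc : l[j + 2]? = some c := by
          have h0 : (l.drop j)[(2 : Nat)]? = some c := by rw [h]; rfl
          rw [List.getElem?_drop] at h0; simpa using h0
        rw [PySem.List.pyRange_one_cons (by push_cast; omega), List.foldl_cons]
        have hstep : stepA l st ((j : Int) + 1) = step3 a b c st := by
          unfold stepA step3
          have e1 : ((j : Int) + 1 - 1) = ((j : Nat) : Int) := by ring
          have e0 : ((j : Int) + 1) = (((j + 1 : Nat)) : Int) := by push_cast; ring
          have e2 : ((j : Int) + 1 + 1) = (((j + 2 : Nat)) : Int) := by push_cast; ring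
          rw [e2, e1, e0, PySem.List.pyGet?_natCast, PySem.List.pyGet?_natCast, PySem.List.pyGet?_natCast]
          rw [ha, hb, hc]
          rfl
        rw [hstep]
        have e3 : ((j : Int) + 1 + 1) = (((j + 1 : Nat) : Int) + 1) := by push_cast; ring
        rw [e3, ih l (j + 1) (step3 a b c st) hdrop1, wfold3]

-- window fold = reference scan, on lists whose tail is binary
lemma wfold_scan : ∀ (l : List Char), (∀ c ∈ l, c = '0' ∨ c = '1') →
    ((∀ res : Int, 0 ≤ res → (wfold ('1' :: l) (res, 0)).1 = scanIn l 0 res)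
    ∧ (∀ (a : Char) (res : Int), a ≠ '1' → 0 ≤ res → (wfold (a :: l) (res, 0)).1 = scanPre2 l res)
    ∧ (∀ (cur res : Int), 0 ≤ res → 1 ≤ cur → (∀ b, l.head? = some b → b ≠ '1') →
        (wfold ('0' :: l) (res, cur)).1 = scanIn l cur res)) := by
  
  intro l
  induction l with
  | nil =>
    intro _
    refine ⟨?_, ?_, ?_⟩
    · intro res _; simp [wfold, scanIn]
    · intro a res _ _; simp [wfold, scanPre2]
    · intro cur res _ _ _; simp [wfold, scanIn]
  | cons b rest ih =>
    intro hb
    have hbin : b = '0' ∨ b = '1' := hb b (List.mem_cons_self ..)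
    have hrest : ∀ c ∈ rest, c = '0' ∨ c = '1' := fun c hc => hb c (List.mem_cons_of_mem _ hc)
    obtain ⟨ih1, ih2, ih3⟩ := ih hrest
    refine ⟨?_, ?_, ?_⟩
    · -- previous char '1', cur = 0
      intro res hres
      cases rest with
      | nil =>
        rcases hbin with rfl | rfl
        · simp [wfold, scanIn]
        · simp [wfold, scanIn]; omega
      | cons c t =>
        rw [wfold3]
        rcases hbin with rfl | rfl
        · by_cases hc : c = '1'
          · subst hc
            have hs : step3 '1' '0' '1' (res, 0) = (max res 1, 0) := by simp [step3]
            rw [hs, ih2 '0' (max res 1) (by decide) (by omega)]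
            simp [scanIn, scanPre2]
          · have hs : step3 '1' '0' c (res, 0) = (res, 1) := by simp [step3, hc]
            rw [hs, ih3 1 res hres (by omega) (by simp [hc])]
            simp [scanIn, hc]
        · have hs : step3 '1' '1' c (res, 0) = (res, 0) := by simp [step3]
          rw [hs, ih1 res hres]
          have hm : max res 0 = res := by omega
          simp [scanIn, hm]
    · -- previous char not '1', cur = 0 (no '1' seen yet)
      intro a res ha hres
      cases rest with
      | nil =>
        rcases hbin with rfl | rfl
        · simp [wfold, scanPre2]
        · simp [wfold, scanPre2, scanIn]
      | cons c t =>
        rw [wfold3]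
        rcases hbin with rfl | rfl
        · have hs : step3 a '0' c (res, 0) = (res, 0) := by
            simp [step3, ha]
            intro h; omega
          rw [hs, ih2 '0' res (by decide) hres]
          simp [scanPre2]
        · have hs : step3 a '1' c (res, 0) = (res, 0) := by simp [step3]
          rw [hs, ih1 res hres]
          simp [scanPre2]
    · -- previous char '0', active zero-run cur ≥ 1, next char not '1'
      intro cur res hres hcur hhead
      have hb0 : b = '0' := by
        rcases hbin with rfl | rfl
        · rfl
        · exact absurd rfl (hhead '1' rfl)
      subst hb0
      cases rest with
      | nil => simp [wfold, scanIn]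
      | cons c t =>
        rw [wfold3]
        by_cases hc : c = '1'
        · subst hc
          have hs : step3 '0' '0' '1' (res, cur) = (max res (cur + 1), 0) := by
            simp [step3]
            omega
          rw [hs, ih2 '0' (max res (cur + 1)) (by decide) (by omega)]
          simp [scanIn, scanPre2]
        · have hs : step3 '0' '0' c (res, cur) = (res, cur + 1) := by
            simp [step3, hc]
            omega
          rw [hs, ih3 (cur + 1) res hres (by omega) (by simp [hc])]
          simp [scanIn, hc]

lemma A_scan (a : Char) (l : List Char) (hb : ∀ c ∈ l, c = '0' ∨ c = '1') :
    (wfold (a :: l) (0, 0)).1 = scanPre2 (a :: l) 0 := by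
  by_cases ha : a = '1'
  · subst ha
    rw [(wfold_scan l hb).1 0 le_rfl]
    simp [scanPre2, scanIn]
  · rw [(wfold_scan l hb).2.1 a 0 ha le_rfl]
    simp [scanPre2, ha]

lemma gaps_cons_cons (a b : Int) (xs : List Int) :
    gaps (a :: b :: xs) = (b - a - 1) :: gaps (b :: xs) := by
  simp [gaps]

lemma gaps_nonneg_aux : ∀ (t : List Char) (s p : Int), p < s → ∀ g ∈ gaps (p :: onesF t s), 0 ≤ g := by
  
  intro t
  induction t with
  | nil => intro s p _ g hg; simp [onesF, gaps, PySem.List.enumerate_nil] at hg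
  | cons c t ih =>
    intro s p hps g hg
    rw [onesF_cons] at hg
    by_cases hc : c = '1'
    · rw [if_pos hc, gaps_cons_cons] at hg
      rcases List.mem_cons.mp hg with rfl | hg
      · omega
      · exact ih (s+1) s (by omega) g hg
    · rw [if_neg hc] at hg
      exact ih (s+1) p (by omega) g hg

lemma IN : ∀ (t : List Char) (p s cur res : Int), s = p + cur + 1 →
    (gaps (p :: onesF t s)).foldl max res = scanIn t cur res := by
  
  intro t
  induction t with
  | nil => intro p s cur res h; simp [onesF, gaps, PySem.List.enumerate_nil, scanIn]
  | cons c t ih =>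
    intro p s cur res h
    rw [onesF_cons]
    by_cases hc : c = '1'
    · rw [hc, if_pos rfl, gaps_cons_cons, List.foldl_cons]
      have : s - p - 1 = cur := by omega
      rw [this, ih s (s+1) 0 (max res cur) (by omega)]
      simp [scanIn, hc]
    · rw [if_neg hc]
      rw [ih p (s+1) (cur+1) res (by omega)]
      simp [scanIn, hc]

lemma MAXD (xs : List Int) (h : ∀ x ∈ xs, 0 ≤ x) :
    (PySem.List.max? xs (fun x => x)).getD 0 = xs.foldl max 0 := by
  
  cases xs with
  | nil => simp [PySem.List.max?]
  | cons x t =>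
    rw [PySem.List.max?_id_cons]
    have hx : 0 ≤ x := h x (List.mem_cons_self ..)
    simp only [Option.getD_some, List.foldl_cons]
    congr 1
    omega

lemma TOP : ∀ (l : List Char) (s : Int),
    (PySem.List.max? (gaps (onesF l s)) (fun x => x)).getD 0 = scanPre2 l 0 := by
  
  intro l
  induction l with
  | nil => intro s; simp [onesF, gaps, PySem.List.enumerate_nil, scanPre2, PySem.List.max?]
  | cons c t ih =>
    intro s
    rw [onesF_cons]
    by_cases hc : c = '1'
    · rw [hc, if_pos rfl, MAXD _ (gaps_nonneg_aux t (s+1) s (by omega)), IN t s (s+1) 0 0 (by omega)]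
      simp [scanPre2, hc]
    · rw [if_neg hc, ih (s+1)]
      simp [scanPre2, hc]

-- binary facts about Nat.toDigits 2
lemma toDigitsCore_ne_nil : ∀ (fuel n : Nat) (ds : List Char), ds ≠ [] →
    Nat.toDigitsCore 2 fuel n ds ≠ [] := by
  
  intro fuel
  induction fuel with
  | zero => intro n ds h; simpa [Nat.toDigitsCore] using h
  | succ fuel ih =>
    intro n ds h
    simp only [Nat.toDigitsCore]
    split
    · simp
    · exact ih _ _ (by simp)

lemma toDigits_ne_nil (m : Nat) : Nat.toDigits 2 m ≠ [] := by
  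
  simp only [Nat.toDigits, Nat.toDigitsCore]
  split
  · simp
  · exact toDigitsCore_ne_nil _ _ _ (by simp)

lemma toDigitsCore_binary : ∀ (fuel n : Nat) (ds : List Char), (∀ c ∈ ds, c = '0' ∨ c = '1') →
    ∀ c ∈ Nat.toDigitsCore 2 fuel n ds, c = '0' ∨ c = '1' := by
  
  intro fuel
  induction fuel with
  | zero => intro n ds h; simpa [Nat.toDigitsCore] using h
  | succ fuel ih =>
    intro n ds h
    have hd : Nat.digitChar (n % 2) = '0' ∨ Nat.digitChar (n % 2) = '1' := by
      rcases Nat.mod_two_eq_zero_or_one n with h2 | h2 <;> rw [h2] <;> simp [Nat.digitChar]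
    simp only [Nat.toDigitsCore]
    split
    · intro c hc
      rcases List.mem_cons.mp hc with rfl | hc
      · exact hd
      · exact h c hc
    · refine ih _ _ ?_
      intro c hc
      rcases List.mem_cons.mp hc with rfl | hc
      · exact hd
      · exact h c hc

lemma toDigits_binary (m : Nat) : ∀ c ∈ Nat.toDigits 2 m, c = '0' ∨ c = '1' := by
  
  have hd : Nat.digitChar (m % 2) = '0' ∨ Nat.digitChar (m % 2) = '1' := by
    rcases Nat.mod_two_eq_zero_or_one m with h2 | h2 <;> rw [h2] <;> simp [Nat.digitChar]
  simp only [Nat.toDigits, Nat.toDigitsCore]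
  split
  · intro c hc
    rcases List.mem_cons.mp hc with rfl | hc
    · exact hd
    · simp at hc
  · refine toDigitsCore_binary _ _ _ ?_
    intro c hc
    rcases List.mem_cons.mp hc with rfl | hc
    · exact hd
    · simp at hc

lemma solution_eq_wfold (N : Int) :
    solution N = (wfold ((PySem.Int.toBinChars0b N).drop 2) (0, 0)).1 := by
  have := G' ((PySem.Int.toBinChars0b N).drop 2) ((PySem.Int.toBinChars0b N).drop 2) 0 (0, 0) rfl
  unfold solution
  simp only [PySem.List.len_eq]
  norm_num [List.length_drop] at this ⊢
  rw [this]

lemma solution_alt_eq (N : Int) :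
    solution_alt N = scanPre2 ((PySem.Int.toBinChars0b N).drop 2) 0 := by
  unfold solution_alt
  exact TOP ((PySem.Int.toBinChars0b N).drop 2) 0

-- ===== VERDICT (by name: the statement is the Claim_ definition above) =====
theorem solution_spec : Claim_equal_solution := by
  unfold Claim_equal_solution
  intro N _
  unfold Spec_solution
  rw [solution_eq_wfold, solution_alt_eq]
  by_cases hN : N < 0
  · have hbr : (PySem.Int.toBinChars0b N).drop 2 = 'b' :: Nat.toDigits 2 N.natAbs := by
      simp [PySem.Int.toBinChars0b, hN]
    rw [hbr, A_scan _ _ (toDigits_binary _)]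
  · have hbr : (PySem.Int.toBinChars0b N).drop 2 = Nat.toDigits 2 N.toNat := by
      simp [PySem.Int.toBinChars0b, hN]
    obtain ⟨a, l, hl⟩ := List.exists_cons_of_ne_nil (toDigits_ne_nil N.toNat)
    rw [hbr, hl, A_scan _ _ (fun c hc => toDigits_binary N.toNat c (hl ▸ List.mem_cons_of_mem _ hc))]
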